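-- pv_equiv track=rewrite | github.com/Lee-412/KLTN_observability_for_microservice | SignozCore/scripts/one_click_sampling_proof.py | extract_eval_summary
-- ===== SOURCE A (Python) =====
-- def extract_eval_summary(eval_text: str) -> list[str]:
--     wanted_prefixes = (
--         "kept traces    :",
--         "dropped traces :",
--         "kept spans rate:",
--         "kept duration_ms p50/p95/p99:",
--         "kept duration_ms range",
--         "estimated keep threshold duration_ms",
--         "non-error separation:",
--     )
--
--     lines = [ln.rstrip() for ln in eval_text.splitlines()]
--     out: list[str] = []
--     in_kept_bucket = False
--
--     for ln in lines:
--         if any(ln.startswith(prefix) for prefix in wanted_prefixes):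
--             out.append(ln)
--
--         if ln.strip() == "kept     duration buckets:":
--             in_kept_bucket = True
--             out.append(ln)
--             continue
--
--         if in_kept_bucket:
--             if ln.startswith("  <10ms") or ln.startswith("  10-100ms") or ln.startswith("  100-500ms") or ln.startswith("  >=500ms"):
--                 out.append(ln)
--                 continue
--             in_kept_bucket = False
--
--     if not out:
--         return ["(summary unavailable)"]
--     return out
-- ===== SOURCE B (Python) =====
-- def extract_eval_summary(eval_text: str) -> list[str]:
--     wanted_prefixes = (
--         "kept traces    :",
--         "dropped traces :",
--         "kept spans rate:",
--         "kept duration_ms p50/p95/p99:",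
--         "kept duration_ms range",
--         "estimated keep threshold duration_ms",
--         "non-error separation:",
--     )
--     bucket_prefixes = ("  <10ms", "  10-100ms", "  100-500ms", "  >=500ms")
--
--     lines = [ln.rstrip() for ln in eval_text.splitlines()]
--     out: list[str] = []
--     i = 0
--     n = len(lines)
--     while i < n:
--         ln = lines[i]
--         if ln.startswith(wanted_prefixes):
--             out.append(ln)
--         if ln.strip() == "kept     duration buckets:":
--             out.append(ln)
--             i += 1
--             while i < n and lines[i].startswith(bucket_prefixes):
--                 out.append(lines[i])
--                 i += 1
--             continue
--         i += 1
--
--     if not out: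
--         return ["(summary unavailable)"]
--     return out
-- ===== Notes on version B (the rewrite author's own statement) =====
-- stated objective: alternative
-- what changed: Replaces A's carried in_kept_bucket boolean threaded through a single for-loop with an index-based while scan that, on seeing the bucket header, consumes the whole consecutive bucket block in a dedicated inner loop and restarts the outer loop on the first non-bucket line.
import Mathlib
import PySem

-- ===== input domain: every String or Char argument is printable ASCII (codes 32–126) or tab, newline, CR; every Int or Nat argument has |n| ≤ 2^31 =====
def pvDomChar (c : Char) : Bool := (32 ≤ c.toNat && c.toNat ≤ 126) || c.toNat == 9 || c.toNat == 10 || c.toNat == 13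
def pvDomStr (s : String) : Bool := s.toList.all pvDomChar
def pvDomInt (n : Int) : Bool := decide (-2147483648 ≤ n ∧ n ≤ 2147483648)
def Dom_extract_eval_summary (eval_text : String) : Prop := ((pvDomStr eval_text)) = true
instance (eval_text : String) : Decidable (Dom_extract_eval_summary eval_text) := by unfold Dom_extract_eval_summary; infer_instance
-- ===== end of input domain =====

-- B replaces A's carried `in_kept_bucket` flag with an index-based scan that consumes each
-- bucket block in a dedicated inner loop (objective: alternative decomposition, same cost).

-- ===== PORT A =====
-- any(ln.startswith(prefix) for prefix in wanted_prefixes)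
def pvWanted (ln : String) : Bool :=
  PySem.Str.startswith ln "kept traces    :" ||
  PySem.Str.startswith ln "dropped traces :" ||
  PySem.Str.startswith ln "kept spans rate:" ||
  PySem.Str.startswith ln "kept duration_ms p50/p95/p99:" ||
  PySem.Str.startswith ln "kept duration_ms range" ||
  PySem.Str.startswith ln "estimated keep threshold duration_ms" ||
  PySem.Str.startswith ln "non-error separation:"

-- the body of A's for-loop: state is (out, in_kept_bucket)
def pvStepA (st : List String × Bool) (ln : String) : List String × Bool :=
  let out := if pvWanted ln then st.1 ++ [ln] else st.1
  if PySem.Str.strip ln == "kept     duration buckets:" then (out ++ [ln], true)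
  else if st.2 then
    if PySem.Str.startswith ln "  <10ms" || PySem.Str.startswith ln "  10-100ms" ||
       PySem.Str.startswith ln "  100-500ms" || PySem.Str.startswith ln "  >=500ms" then
      (out ++ [ln], true)
    else (out, false)
  else (out, st.2)

def extract_eval_summary (eval_text : String) : List String :=
  let lines := (PySem.Str.splitlines eval_text).map PySem.Str.rstrip
  let out := (lines.foldl pvStepA ([], false)).1
  if out = [] then ["(summary unavailable)"] else out

-- ===== PORT B =====
-- ln.startswith(bucket_prefixes)
def pvBucket (ln : String) : Bool :=
  PySem.Str.startswith ln "  <10ms" || PySem.Str.startswith ln "  10-100ms" ||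
  PySem.Str.startswith ln "  100-500ms" || PySem.Str.startswith ln "  >=500ms"

-- B's inner `while i < n and lines[i].startswith(bucket_prefixes)` loop:
-- returns (the consumed bucket lines, the remaining lines)
def pvTakeBuckets : List String → List String × List String
  | [] => ([], [])
  | ln :: rest =>
    if pvBucket ln then
      let p := pvTakeBuckets rest
      (ln :: p.1, p.2)
    else ([], ln :: rest)

theorem pvTakeBuckets_snd_le (l : List String) : (pvTakeBuckets l).2.length ≤ l.length := by
  induction l with
  | nil => simp [pvTakeBuckets]
  | cons ln rest ih =>
    simp only [pvTakeBuckets]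
    split
    · exact Nat.le_succ_of_le ih
    · simp

-- B's outer `while i < n` scan, advancing over the remaining lines
def pvLoopB : List String → List String
  | [] => []
  | ln :: rest =>
    let pre := if pvWanted ln then [ln] else []
    if PySem.Str.strip ln == "kept     duration buckets:" then
      pre ++ [ln] ++ (pvTakeBuckets rest).1 ++ pvLoopB (pvTakeBuckets rest).2
    else
      pre ++ pvLoopB rest
termination_by l => l.length
decreasing_by
  · exact Nat.lt_succ_of_le (pvTakeBuckets_snd_le rest)
  · simp

def extract_eval_summary_alt (eval_text : String) : List String :=
  let lines := (PySem.Str.splitlines eval_text).map PySem.Str.rstrip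
  let out := pvLoopB lines
  if out = [] then ["(summary unavailable)"] else out

-- ===== PRECONDITION & SPEC =====
def Spec_extract_eval_summary (eval_text : String) (out : List String) : Prop := out = extract_eval_summary_alt eval_text
instance (eval_text : String) (out : List String) : Decidable (Spec_extract_eval_summary eval_text out) := by unfold Spec_extract_eval_summary; infer_instance

-- ===== CLAIM (what is proved, stated in full; the proofs are below) =====
def Claim_equal_extract_eval_summary : Prop := ∀ (eval_text : String), Dom_extract_eval_summary eval_text → Spec_extract_eval_summary eval_text (extract_eval_summary eval_text)

-- ===== LEMMAS AND PROOFS =====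

theorem pvLoopB_cons (ln : String) (rest : List String) :
    pvLoopB (ln :: rest) =
      (let pre := if pvWanted ln then [ln] else []
       if PySem.Str.strip ln == "kept     duration buckets:" then
         pre ++ [ln] ++ (pvTakeBuckets rest).1 ++ pvLoopB (pvTakeBuckets rest).2
       else pre ++ pvLoopB rest) := by
  rw [pvLoopB.eq_def]

theorem pv_startswith_head (s p : String) (c : Char)
    (hp : p.toList.head? = some c) (h : PySem.Str.startswith s p = true) :
    s.toList.head? = some c := by
  rw [PySem.Str.startswith_eq, PySem.Chars.startswith_iff] at h
  obtain ⟨u, hu⟩ := h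
  cases hpl : p.toList with
  | nil => simp [hpl] at hp
  | cons a t =>
    rw [hpl] at hu hp
    rw [← hu]
    simpa using hp

-- a bucket line starts with "  ", so no wanted prefix (all starting with a letter) matches it
theorem pvBucket_not_wanted (s : String) (h : pvBucket s = true) : pvWanted s = false := by
  have hsp : s.toList.head? = some ' ' := by
    unfold pvBucket at h
    simp only [Bool.or_eq_true] at h
    rcases h with ((h | h) | h) | h
    · exact pv_startswith_head s _ ' ' (by decide) h
    · exact pv_startswith_head s _ ' ' (by decide) h
    · exact pv_startswith_head s _ ' ' (by decide) h
    · exact pv_startswith_head s _ ' ' (by decide) h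
  by_contra hw
  rw [Bool.not_eq_false] at hw
  unfold pvWanted at hw
  simp only [Bool.or_eq_true] at hw
  rcases hw with (((((h'|h')|h')|h')|h')|h')|h' <;>
    first
      | (have := pv_startswith_head s _ 'k' (by decide) h'; simp_all)
      | (have := pv_startswith_head s _ 'd' (by decide) h'; simp_all)
      | (have := pv_startswith_head s _ 'e' (by decide) h'; simp_all)
      | (have := pv_startswith_head s _ 'n' (by decide) h'; simp_all)

-- A's fold from either flag state equals B's scan (out is the accumulated prefix)
theorem pvLoop_eq (lines : List String) : ∀ (out : List String),
    ((lines.foldl pvStepA (out, false)).1 = out ++ pvLoopB lines) ∧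
    ((lines.foldl pvStepA (out, true)).1 =
      out ++ (pvTakeBuckets lines).1 ++ pvLoopB (pvTakeBuckets lines).2) := by
  induction lines with
  | nil => intro out; simp [pvLoopB, pvTakeBuckets]
  | cons ln rest ih =>
    intro out
    constructor
    · -- flag = false
      simp only [List.foldl_cons]
      by_cases hh : PySem.Str.strip ln == "kept     duration buckets:"
      · rw [show pvStepA (out, false) ln =
            ((if pvWanted ln then out ++ [ln] else out) ++ [ln], true) by
              simp [pvStepA, hh]]
        rw [(ih _).2, pvLoopB_cons]
        split_ifs with hw <;> simp_all [List.append_assoc]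
      · rw [show pvStepA (out, false) ln =
            ((if pvWanted ln then out ++ [ln] else out), false) by
              simp [pvStepA, hh]]
        rw [(ih _).1, pvLoopB_cons]
        split_ifs with hw <;> simp_all [List.append_assoc]
    · -- flag = true
      simp only [List.foldl_cons]
      by_cases hb : pvBucket ln
      · -- bucket line: consumed, stays in bucket state; never wanted
        have hw := pvBucket_not_wanted ln hb
        rw [show pvStepA (out, true) ln = (out ++ [ln], true) by
              unfold pvStepA pvBucket at *
              simp only [hw, Bool.false_eq_true, if_false]
              split_ifs <;> simp_all]
        rw [(ih _).2,
            show pvTakeBuckets (ln :: rest) =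
              (ln :: (pvTakeBuckets rest).1, (pvTakeBuckets rest).2) by
                simp [pvTakeBuckets, hb]]
        simp [List.append_assoc]
      · -- not a bucket line: re-handled exactly as the outer scan does
        rw [show pvTakeBuckets (ln :: rest) = ([], ln :: rest) by
              simp [pvTakeBuckets, hb]]
        by_cases hh : PySem.Str.strip ln == "kept     duration buckets:"
        · rw [show pvStepA (out, true) ln =
              ((if pvWanted ln then out ++ [ln] else out) ++ [ln], true) by
                simp [pvStepA, hh]]
          rw [(ih _).2]
          rw [pvLoopB_cons]
          split_ifs with hw <;> simp_all [List.append_assoc]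
        · rw [show pvStepA (out, true) ln =
              ((if pvWanted ln then out ++ [ln] else out), false) by
                unfold pvStepA pvBucket at *
                simp only [hh]
                split_ifs <;> simp_all]
          rw [(ih _).1]
          rw [pvLoopB_cons]
          split_ifs with hw <;> simp_all [List.append_assoc]

-- ===== VERDICT (by name: the statement is the Claim_ definition above) =====
theorem extract_eval_summary_spec : Claim_equal_extract_eval_summary := by
  intro eval_text _
  unfold Spec_extract_eval_summary
  simp only [extract_eval_summary, extract_eval_summary_alt]
  rw [(pvLoop_eq ((PySem.Str.splitlines eval_text).map PySem.Str.rstrip) []).1]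
  simp
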